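-- pv_equiv track=rewrite | github.com/mat-mathews/wex_scatter | scatter/analyzers/coupling_analyzer.py | _shortest_cycle_in_scc
-- ===== SOURCE A (Python) =====
-- from collections import defaultdict, deque
-- from typing import Dict, List, Optional, Set, Tuple
--
-- def _shortest_cycle_in_scc(
--     adjacency: Dict[str, Set[str]],
--     scc: List[str],
-- ) -> List[str]:
--     """Find shortest cycle within an SCC via BFS with predecessor map.
--
--     Uses O(N) memory predecessor tracking instead of O(N^2) path copying.
--
--     For small SCCs (typical), BFS from each node.
--     For large SCCs (>50), BFS from first node only.
--     """
--     scc_set = set(scc)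
--     best_cycle: Optional[List[str]] = None
--
--     # For large SCCs, limit search to first node
--     search_nodes = scc if len(scc) <= 50 else scc[:1]
--
--     for start in search_nodes:
--         # BFS to find shortest path back to start using predecessor map
--         predecessor: Dict[str, str] = {}
--         queue: deque[str] = deque()
--
--         for neighbor in sorted(adjacency.get(start, set())):
--             if neighbor in scc_set:
--                 if neighbor == start:
--                     return [start]
--                 predecessor[neighbor] = start
--                 queue.append(neighbor)
--
--         found = False
--         while queue and not found:
--             current = queue.popleft()
--             for neighbor in sorted(adjacency.get(current, set())):
--                 if neighbor not in scc_set: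
--                     continue
--                 if neighbor == start:
--                     # Reconstruct path from predecessor chain
--                     path = []
--                     node = current
--                     while node != start:
--                         path.append(node)
--                         node = predecessor[node]
--                     path.append(start)
--                     path.reverse()
--                     if best_cycle is None or len(path) < len(best_cycle):
--                         best_cycle = path
--                     found = True
--                     break
--                 if neighbor not in predecessor:
--                     predecessor[neighbor] = current
--                     queue.append(neighbor)
--
--     return best_cycle if best_cycle is not None else scc[:2]
-- ===== SOURCE B (Python) =====
-- def _shortest_cycle_in_scc(adjacency, scc):
--     """Find shortest cycle within an SCC via level-synchronous BFS.
--
--     Instead of a node queue with a predecessor map and a reconstruction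
--     pass, the search proceeds frontier-by-frontier; each frontier entry is
--     the path (excluding the start node) leading to it, so a completed
--     cycle is read off directly.  The start node itself is the level-0
--     frontier entry (the empty path), so there is no separate seeding loop.
--     """
--     scc_set = set(scc)
--     best = None
--
--     for start in (scc if len(scc) <= 50 else scc[:1]):
--         seen = set()
--         frontier = [[]]
--         cycle = None
--         while frontier and cycle is None:
--             nxt = []
--             for path in frontier:
--                 cur = path[-1] if path else start
--                 nbrs = [n for n in sorted(adjacency.get(cur, set())) if n in scc_set]
--                 if start in nbrs:
--                     if not path:
--                         return [start]
--                     cycle = [start] + path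
--                     break
--                 for n in nbrs:
--                     if n not in seen:
--                         seen.add(n)
--                         nxt.append(path + [n])
--             frontier = nxt
--         if cycle is not None and (best is None or len(cycle) < len(best)):
--             best = cycle
--     return best if best is not None else scc[:2]
-- ===== Notes on version B (the rewrite author's own statement) =====
-- stated objective: alternative
-- what changed: B replaces A's node-queue BFS with predecessor map and path-reconstruction pass by a level-synchronous frontier BFS: each frontier entry carries its own path, the start node is the level-0 entry (no separate seeding loop), a cycle is detected by one membership test on the sorted in-SCC neighbor list instead of per-neighbor comparison, and the completed cycle is read off the frontier entry directly.
import Mathlib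
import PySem

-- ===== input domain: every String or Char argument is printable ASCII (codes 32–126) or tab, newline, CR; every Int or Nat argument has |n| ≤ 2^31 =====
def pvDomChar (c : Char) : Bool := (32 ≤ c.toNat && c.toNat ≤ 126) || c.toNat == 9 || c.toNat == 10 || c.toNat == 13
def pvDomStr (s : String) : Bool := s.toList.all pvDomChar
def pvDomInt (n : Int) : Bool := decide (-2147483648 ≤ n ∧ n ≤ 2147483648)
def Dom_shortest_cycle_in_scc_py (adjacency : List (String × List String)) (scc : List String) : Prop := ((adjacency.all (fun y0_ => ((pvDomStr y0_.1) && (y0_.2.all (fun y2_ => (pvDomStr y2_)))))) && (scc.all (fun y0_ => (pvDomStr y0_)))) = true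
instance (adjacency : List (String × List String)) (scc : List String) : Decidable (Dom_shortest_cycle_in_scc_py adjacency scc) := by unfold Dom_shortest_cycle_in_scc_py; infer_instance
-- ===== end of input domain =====

-- B replaces A's node-queue BFS (predecessor map + path-reconstruction pass) by a
-- level-synchronous frontier BFS whose entries carry their own paths ('alternative'
-- objective: a different decomposition with the same return value).

-- sorted(adjacency.get(v, set())): the adjacency values are Python sets (distinct elements)
def pvSortedNbrs (adj : PySem.Dict String (List String)) (v : String) : List String :=
  PySem.List.sorted (PySem.Set.ofList (adj.getD v [])) (fun x => x) false

-- ===== PORT A =====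

-- initial seeding loop: 'for neighbor in sorted(adjacency.get(start, set())): …'
-- none = the early 'return [start]' (self-loop)
def pvInitA (sccSet : PySem.Set String) (start : String) :
    List String → PySem.Dict String String → List String →
    Option (PySem.Dict String String × List String)
  | [], pred, q => some (pred, q)
  | n :: rest, pred, q =>
    if n ∈ sccSet then
      if n = start then none
      else pvInitA sccSet start rest (pred.insert n start) (q ++ [n])
    else pvInitA sccSet start rest pred q

-- 'path = []; node = current; while node != start: path.append(node); node = predecessor[node];
--  path.append(start); path.reverse()' — fuel-bounded (pred.size + 1 always suffices: the
-- predecessor chain built by the algorithm strictly descends to start); a missing key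
-- (Python KeyError, unreachable in the algorithm's states) yields []
def pvReconGo (pred : PySem.Dict String String) (start : String) :
    Nat → String → List String → List String
  | 0, _, path => (path ++ [start]).reverse
  | fuel + 1, node, path =>
    if node = start then (path ++ [start]).reverse
    else
      match pred.get? node with
      | some m => pvReconGo pred start fuel m (path ++ [node])
      | none => []

def pvRecon (pred : PySem.Dict String String) (start current : String) : List String :=
  pvReconGo pred start (pred.size + 1) current []

-- inner 'for neighbor in sorted(adjacency.get(current, set())): …' of A's BFS loop;
-- returns (predecessor, queue, best_cycle, found)
def pvInnerA (sccSet : PySem.Set String) (start current : String) :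
    List String → PySem.Dict String String → List String → Option (List String) →
    PySem.Dict String String × List String × Option (List String) × Bool
  | [], pred, q, best => (pred, q, best, false)
  | n :: rest, pred, q, best =>
    if n ∈ sccSet then
      if n = start then
        let path := pvRecon pred start current
        let best' := match best with
          | none => some path
          | some b => if path.length < b.length then some path else some b
        (pred, q, best', true)
      else if pred.contains n then pvInnerA sccSet start current rest pred q best
      else pvInnerA sccSet start current rest (pred.insert n current) (q ++ [n]) best
    else pvInnerA sccSet start current rest pred q best

-- 'while queue and not found: …' — fuel-bounded (nodes are enqueued at most once each and
-- each pop consumes one, so scc.length + 1 pops can never be exceeded)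
def pvBfsA (adj : PySem.Dict String (List String)) (sccSet : PySem.Set String) (start : String) :
    Nat → PySem.Dict String String → List String → Option (List String) → Option (List String)
  | 0, _, _, best => best
  | _ + 1, _, [], best => best
  | fuel + 1, pred, current :: q, best =>
    let r := pvInnerA sccSet start current (pvSortedNbrs adj current) pred q best
    if r.2.2.2 then r.2.2.1 else pvBfsA adj sccSet start fuel r.1 r.2.1 r.2.2.1

-- 'for start in search_nodes: …'; Sum.inl = the early 'return [start]'
def pvStartsA (adj : PySem.Dict String (List String)) (sccSet : PySem.Set String) (fuel : Nat) :
    List String → Option (List String) → List String ⊕ Option (List String)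
  | [], best => Sum.inr best
  | start :: rest, best =>
    match pvInitA sccSet start (pvSortedNbrs adj start) PySem.Dict.empty [] with
    | none => Sum.inl [start]
    | some (pred, q) => pvStartsA adj sccSet fuel rest (pvBfsA adj sccSet start fuel pred q best)

def shortest_cycle_in_scc_py (adjacency : List (String × List String)) (scc : List String) : List String :=
  let adj := PySem.Dict.ofList adjacency
  let sccSet := PySem.Set.ofList scc
  let searchNodes := if scc.length ≤ 50 then scc else PySem.List.slice scc none (some 1)
  match pvStartsA adj sccSet (scc.length + 1) searchNodes none with
  | Sum.inl c => c
  | Sum.inr (some best) => best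
  | Sum.inr none => PySem.List.slice scc none (some 2)

-- ===== PORT B =====

-- '[n for n in sorted(adjacency.get(cur, set())) if n in scc_set]'
def pvNbrsB (adj : PySem.Dict String (List String)) (sccSet : PySem.Set String) (v : String) : List String :=
  (pvSortedNbrs adj v).filter (fun n => decide (n ∈ sccSet))

-- 'if cycle is not None and (best is None or len(cycle) < len(best)): best = cycle'
def pvUpd (best : Option (List String)) (c : List String) : Option (List String) :=
  match best with
  | none => some c
  | some b => if c.length < b.length then some c else some b

-- 'for n in nbrs: if n not in seen: seen.add(n); nxt.append(path + [n])'
def pvExtendB (path : List String) :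
    List String → PySem.Set String → List (List String) →
    PySem.Set String × List (List String)
  | [], seen, nxt => (seen, nxt)
  | n :: rest, seen, nxt =>
    if n ∈ seen then pvExtendB path rest seen nxt
    else pvExtendB path rest (seen.add n) (nxt ++ [path ++ [n]])

-- 'for path in frontier: …' of one BFS level; fuel is threaded through (one unit per
-- frontier entry, the shared totality device of the while loop); results:
-- inl (fuel', seen, nxt) = level done, inr none = fuel exhausted (never on the fuel the
-- caller supplies), inr (some (isLevel0, cycle)) = 'if not path: return [start]' / cycle found
def pvLevelB (adj : PySem.Dict String (List String)) (sccSet : PySem.Set String) (start : String) :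
    Nat → List (List String) → PySem.Set String → List (List String) →
    (Nat × PySem.Set String × List (List String)) ⊕ Option (Bool × List String)
  | fuel, [], seen, nxt => Sum.inl (fuel, seen, nxt)
  | 0, _ :: _, _, _ => Sum.inr none
  | fuel + 1, path :: rest, seen, nxt =>
    let cur := PySem.List.pyGetD path (-1) start     -- 'path[-1] if path else start'
    let nbrs := pvNbrsB adj sccSet cur
    if start ∈ nbrs then Sum.inr (some (path.isEmpty, start :: path))
    else
      let p := pvExtendB path nbrs seen nxt
      pvLevelB adj sccSet start fuel rest p.1 p.2

-- fuel bookkeeping for the well-founded recursion of pvOuterB (cited in decreasing_by)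
theorem pvLevelB_fuel_le (adj : PySem.Dict String (List String)) (sccSet : PySem.Set String)
    (start : String) :
    ∀ (fr : List (List String)) (fuel : Nat) (seen : PySem.Set String)
      (nxt : List (List String)) (f' : Nat) (s' : PySem.Set String) (n' : List (List String)),
      pvLevelB adj sccSet start fuel fr seen nxt = Sum.inl (f', s', n') → f' ≤ fuel := by
  intro fr
  induction fr with
  | nil => intro fuel seen nxt f' s' n' h; simp [pvLevelB] at h; omega
  | cons p rest ih =>
    intro fuel seen nxt f' s' n' h
    cases fuel with
    | zero => simp [pvLevelB] at h
    | succ fuel =>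
      simp only [pvLevelB] at h
      split at h
      · cases h
      · exact Nat.le_succ_of_le (ih fuel _ _ f' s' n' h)

theorem pvLevelB_fuel_lt (adj : PySem.Dict String (List String)) (sccSet : PySem.Set String)
    (start : String) (fuel : Nat) (p : List String) (rest : List (List String))
    (seen : PySem.Set String) (nxt : List (List String)) (f' : Nat) (s' : PySem.Set String)
    (n' : List (List String))
    (h : pvLevelB adj sccSet start (fuel + 1) (p :: rest) seen nxt = Sum.inl (f', s', n')) :
    f' ≤ fuel := by
  simp only [pvLevelB] at h
  split at h
  · cases h
  · exact pvLevelB_fuel_le adj sccSet start rest fuel _ _ f' s' n' h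

-- 'while frontier and cycle is None: …' (fuel threaded through the levels)
def pvOuterB (adj : PySem.Dict String (List String)) (sccSet : PySem.Set String) (start : String) :
    Nat → List (List String) → PySem.Set String → Option (Bool × List String)
  | 0, _, _ => none
  | _ + 1, [], _ => none
  | fuel + 1, p :: rest, seen =>
    match h : pvLevelB adj sccSet start (fuel + 1) (p :: rest) seen [] with
    | Sum.inr r => r
    | Sum.inl (fuel', seen', nxt') => pvOuterB adj sccSet start fuel' nxt' seen'
  termination_by fuel _ _ => fuel
  decreasing_by exact Nat.lt_succ_of_le (pvLevelB_fuel_lt adj sccSet start fuel p rest seen [] _ _ _ h)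

-- 'for start in search_nodes: …'; Sum.inl = the early 'return [start]' (level-0 hit)
def pvStartsB (adj : PySem.Dict String (List String)) (sccSet : PySem.Set String) (fuel : Nat) :
    List String → Option (List String) → List String ⊕ Option (List String)
  | [], best => Sum.inr best
  | start :: rest, best =>
    match pvOuterB adj sccSet start fuel [[]] PySem.Set.empty with
    | some (true, c) => Sum.inl c
    | some (false, c) => pvStartsB adj sccSet fuel rest (pvUpd best c)
    | none => pvStartsB adj sccSet fuel rest best

def shortest_cycle_in_scc_py_alt (adjacency : List (String × List String)) (scc : List String) : List String :=
  let adj := PySem.Dict.ofList adjacency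
  let sccSet := PySem.Set.ofList scc
  let searchNodes := if scc.length ≤ 50 then scc else PySem.List.slice scc none (some 1)
  match pvStartsB adj sccSet (scc.length + 2) searchNodes none with
  | Sum.inl c => c
  | Sum.inr (some best) => best
  | Sum.inr none => PySem.List.slice scc none (some 2)

-- ===== PRECONDITION & SPEC =====
def Spec_shortest_cycle_in_scc_py (adjacency : List (String × List String)) (scc : List String) (out : List String) : Prop := out = shortest_cycle_in_scc_py_alt adjacency scc
instance (adjacency : List (String × List String)) (scc : List String) (out : List String) : Decidable (Spec_shortest_cycle_in_scc_py adjacency scc out) := by unfold Spec_shortest_cycle_in_scc_py; infer_instance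

-- ===== CLAIM (what is proved, stated in full; the proofs are below) =====
def Claim_equal_shortest_cycle_in_scc_py : Prop := ∀ (adjacency : List (String × List String)) (scc : List String), Dom_shortest_cycle_in_scc_py adjacency scc → Spec_shortest_cycle_in_scc_py adjacency scc (shortest_cycle_in_scc_py adjacency scc)

-- ===== LEMMAS AND PROOFS =====

-- 'p is the BFS-tree path from start to n recorded in the predecessor map pred'
inductive pvChain (pred : PySem.Dict String String) (start : String) : String → List String → Prop
  | base (n : String) : pred.get? n = some start → pvChain pred start n [start, n]
  | step (n m : String) (p : List String) : pred.get? n = some m → m ≠ start →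
      pvChain pred start m p → pvChain pred start n (p ++ [n])

-- 'the A-side queued node n and the B-side frontier path p describe the same BFS-tree entry'
def pvEntryOK (pred : PySem.Dict String String) (start : String) (n : String) (p : List String) : Prop :=
  n ≠ start ∧ pvChain pred start n (start :: p) ∧ p.length ≤ pred.size

def pvInvV (pred : PySem.Dict String String) (vis : PySem.Set String) : Prop :=
  ∀ k, pred.contains k = true ↔ k ∈ vis

theorem pvChain_shape {pred start n p} (h : pvChain pred start n p) : ∃ p', p = p' ++ [n] := by
  cases h with
  | base n h => exact ⟨[start], rfl⟩
  | step n m p h hm hc => exact ⟨p, rfl⟩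

theorem pvChain_stable {pred : PySem.Dict String String} {start n p} (k : String) (v : String)
    (hk : pred.get? k = none ∨ pred.get? k = some v)
    (h : pvChain pred start n p) : pvChain (pred.insert k v) start n p := by
  induction h with
  | base n h =>
    refine pvChain.base n ?_
    by_cases hnk : n = k
    · subst hnk
      rcases hk with hk | hk
      · rw [hk] at h; cases h
      · rw [h] at hk; injection hk with hv; subst hv
        exact PySem.Dict.get?_insert_self _ _ _
    · rw [PySem.Dict.get?_insert_of_ne pred v hnk]; exact h
  | step n m p h hm hc ih =>
    refine pvChain.step n m p ?_ hm ih
    by_cases hnk : n = k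
    · subst hnk
      rcases hk with hk | hk
      · rw [hk] at h; cases h
      · rw [h] at hk; injection hk with hv; subst hv
        exact PySem.Dict.get?_insert_self _ _ _
    · rw [PySem.Dict.get?_insert_of_ne pred v hnk]; exact h

theorem pvRecon_of_chain {pred : PySem.Dict String String} {start n p}
    (h : pvChain pred start n p) (hn : n ≠ start) :
    ∀ fuel acc, p.length ≤ fuel + 1 →
      pvReconGo pred start fuel n acc = p ++ acc.reverse := by
  induction h with
  | base n h =>
    intro fuel acc hlen
    obtain ⟨f, rfl⟩ : ∃ f, fuel = f + 1 := by
      cases fuel with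
      | zero => simp at hlen
      | succ f => exact ⟨f, rfl⟩
    simp only [pvReconGo, if_neg hn, h]
    cases f <;> simp [pvReconGo]
  | step n m p h hm hc ih =>
    intro fuel acc hlen
    obtain ⟨p', rfl⟩ := pvChain_shape hc
    obtain ⟨f, rfl⟩ : ∃ f, fuel = f + 1 := by
      cases fuel with
      | zero => simp at hlen
      | succ f => exact ⟨f, rfl⟩
    simp only [pvReconGo, if_neg hn, h]
    rw [ih hm f (acc ++ [n]) (by simp at hlen ⊢; omega)]
    simp

theorem pvEntryOK_stable {pred : PySem.Dict String String} {start : String} (k v : String)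
    (hk : pred.get? k = none ∨ pred.get? k = some v)
    {n p} (h : pvEntryOK pred start n p) : pvEntryOK (pred.insert k v) start n p := by
  obtain ⟨h1, h2, h3⟩ := h
  refine ⟨h1, pvChain_stable k v hk h2, ?_⟩
  rw [PySem.Dict.size_insert]
  split_ifs with hc
  · exact h3
  · omega

theorem pvForall₂_stable {pred : PySem.Dict String String} {start : String} (k v : String)
    (hk : pred.get? k = none ∨ pred.get? k = some v)
    {qA qB} (h : List.Forall₂ (pvEntryOK pred start) qA qB) :
    List.Forall₂ (pvEntryOK (pred.insert k v) start) qA qB :=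
  h.imp (fun _ _ hx => pvEntryOK_stable k v hk hx)

theorem pvForall₂_append {α β : Type} {R : α → β → Prop} {a c : List α} {b d : List β}
    (h1 : List.Forall₂ R a b) (h2 : List.Forall₂ R c d) : List.Forall₂ R (a ++ c) (b ++ d) := by
  induction h1 with
  | nil => exact h2
  | cons h t ih => exact List.Forall₂.cons h ih

theorem pvNotContains_get? {d : PySem.Dict String String} {k : String}
    (h : d.contains k = false) : d.get? k = none := by
  rw [PySem.Dict.contains_eq_isSome_get?] at h
  exact Option.not_isSome_iff_eq_none.mp (by simp [h])

theorem pvInvV_insert {pred : PySem.Dict String String} {vis : PySem.Set String}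
    (h : pvInvV pred vis) (k v : String) : pvInvV (pred.insert k v) (vis.add k) := by
  intro x
  rw [PySem.Dict.contains_insert, PySem.Set.mem_add]
  constructor
  · intro hx
    rcases Bool.or_eq_true_iff.mp hx with hx | hx
    · exact Or.inr (by simpa using hx)
    · exact Or.inl ((h x).mp hx)
  · intro hx
    rcases hx with hx | hx
    · exact Bool.or_eq_true_iff.mpr (Or.inr ((h x).mpr hx))
    · exact Bool.or_eq_true_iff.mpr (Or.inl (by simp [hx]))

theorem pvEntry_last {pred : PySem.Dict String String} {start n : String} {p : List String}
    (h : pvEntryOK pred start n p) :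
    p ≠ [] ∧ PySem.List.pyGetD p (-1) start = n := by
  obtain ⟨hn, hc, _⟩ := h
  obtain ⟨p', hp⟩ := pvChain_shape hc
  cases p' with
  | nil => simp at hp; exact absurd hp.1.symm hn
  | cons a t =>
    simp only [List.cons_append, List.cons.injEq] at hp
    obtain ⟨rfl, rfl⟩ := hp
    exact ⟨by simp, PySem.List.pyGetD_neg_one_append_singleton t n start⟩

-- A's inner loop when 'start' IS among the sorted in-SCC neighbors of the current node:
-- it sets found and the reconstructed path equals start :: p (B's stored path)
theorem pvInnerA_found (sccSet : PySem.Set String) (start : String) :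
    ∀ (ns : List String) (pred : PySem.Dict String String) (qA : List String)
      (best : Option (List String)) (n : String) (p : List String),
      start ∈ ns → start ∈ sccSet → pvEntryOK pred start n p →
      (pvInnerA sccSet start n ns pred qA best).2.2 = (pvUpd best (start :: p), true) := by
  intro ns
  induction ns with
  | nil => intro _ _ _ _ _ hmem _ _; cases hmem
  | cons m rest ih =>
    intro pred qA best n p hmem hs he
    by_cases hm : m = start
    · have hrec : pvRecon pred start n = start :: p := by
        have := pvRecon_of_chain he.2.1 he.1 (pred.size + 1) []
          (by have := he.2.2; simp; omega)
        simpa [pvRecon] using this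
      subst hm
      cases best <;> simp [pvInnerA, hs, hrec, pvUpd]
    · have hmem' : start ∈ rest := by
        rcases List.mem_cons.mp hmem with h | h
        · exact absurd h.symm hm
        · exact h
      by_cases hscc : m ∈ sccSet
      · by_cases hcont : pred.contains m
        · simp only [pvInnerA, if_pos hscc, if_neg hm, hcont, if_true]
          exact ih pred qA best n p hmem' hs he
        · have hfresh : pred.get? m = none ∨ pred.get? m = some n :=
            Or.inl (pvNotContains_get? (by simpa using hcont))
          simp only [pvInnerA, if_pos hscc, if_neg hm, (by simpa using hcont : pred.contains m = false),
            Bool.false_eq_true, if_false]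
          exact ih (pred.insert m n) (qA ++ [m]) best n p hmem' hs
            (pvEntryOK_stable m n hfresh he)
      · simp only [pvInnerA, if_neg hscc]
        exact ih pred qA best n p hmem' hs he

-- A's inner loop when 'start' is NOT among the in-SCC neighbors: no find, best unchanged,
-- and the enqueued nodes correspond to the paths pvExtendB appends for B
theorem pvInner_ext (sccSet : PySem.Set String) (start : String) :
    ∀ (ns : List String) (pred : PySem.Dict String String) (seen : PySem.Set String)
      (qA : List String) (ps nxt : List (List String)) (best : Option (List String))
      (n : String) (p : List String),
      pvInvV pred seen → pvEntryOK pred start n p →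
      List.Forall₂ (pvEntryOK pred start) qA (ps ++ nxt) →
      start ∉ ns.filter (fun m => decide (m ∈ sccSet)) →
      (pvInnerA sccSet start n ns pred qA best).2.2 = (best, false) ∧
      pvInvV (pvInnerA sccSet start n ns pred qA best).1
        (pvExtendB p (ns.filter (fun m => decide (m ∈ sccSet))) seen nxt).1 ∧
      List.Forall₂ (pvEntryOK (pvInnerA sccSet start n ns pred qA best).1 start)
        (pvInnerA sccSet start n ns pred qA best).2.1
        (ps ++ (pvExtendB p (ns.filter (fun m => decide (m ∈ sccSet))) seen nxt).2) := by
  intro ns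
  induction ns with
  | nil =>
    intro pred seen qA ps nxt best n p hV he hQ _
    exact ⟨rfl, hV, hQ⟩
  | cons m rest ih =>
    intro pred seen qA ps nxt best n p hV he hQ hns
    by_cases hscc : m ∈ sccSet
    · have hfil : (m :: rest).filter (fun m => decide (m ∈ sccSet))
          = m :: rest.filter (fun m => decide (m ∈ sccSet)) := by
        simp [hscc]
      rw [hfil] at hns ⊢
      have hm : m ≠ start := by rintro rfl; exact hns (List.mem_cons.mpr (Or.inl rfl))
      have hns' : start ∉ rest.filter (fun m => decide (m ∈ sccSet)) :=
        fun hx => hns (List.mem_cons_of_mem _ hx)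
      by_cases hmem : m ∈ seen
      · have hcont : pred.contains m = true := (hV m).mpr hmem
        simp only [pvInnerA, pvExtendB, if_pos hscc, if_neg (fun h => hm h), hcont, if_true,
          if_pos hmem]
        exact ih pred seen qA ps nxt best n p hV he hQ hns'
      · have hcont : pred.contains m = false := by
          cases hc : pred.contains m with
          | false => rfl
          | true => exact absurd ((hV m).mp hc) hmem
        have hget : pred.get? m = none := pvNotContains_get? hcont
        have hfresh : pred.get? m = none ∨ pred.get? m = some n := Or.inl hget
        simp only [pvInnerA, pvExtendB, if_pos hscc, if_neg (fun h => hm h), hcont,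
          Bool.false_eq_true, if_false, if_neg hmem]
        have hsize : (pred.insert m n).size = pred.size + 1 := by
          rw [PySem.Dict.size_insert, if_neg (by simp [hcont])]
        have hnewEntry : pvEntryOK (pred.insert m n) start m (p ++ [m]) := by
          refine ⟨hm, ?_, ?_⟩
          · have : (start :: p) ++ [m] = start :: (p ++ [m]) := by simp
            rw [← this]
            exact pvChain.step m n (start :: p) (PySem.Dict.get?_insert_self _ _ _) he.1
              (pvChain_stable m n hfresh he.2.1)
          · have := he.2.2; simp [hsize]; omega
        have hQ' : List.Forall₂ (pvEntryOK (pred.insert m n) start) (qA ++ [m])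
            (ps ++ (nxt ++ [p ++ [m]])) := by
          rw [← List.append_assoc]
          exact pvForall₂_append (pvForall₂_stable m n hfresh hQ)
            (List.forall₂_cons.mpr ⟨hnewEntry, List.Forall₂.nil⟩)
        exact ih (pred.insert m n) (seen.add m) (qA ++ [m]) ps (nxt ++ [p ++ [m]]) best n p
          (pvInvV_insert hV m n) (pvEntryOK_stable m n hfresh he) hQ' hns'
    · have hfil : (m :: rest).filter (fun m => decide (m ∈ sccSet))
          = rest.filter (fun m => decide (m ∈ sccSet)) := by
        simp [hscc]
      rw [hfil] at hns ⊢
      simp only [pvInnerA, if_neg hscc]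
      exact ih pred seen qA ps nxt best n p hV he hQ hns

-- continuation of B's while loop from the middle of a level
def pvOuterMid (adj : PySem.Dict String (List String)) (sccSet : PySem.Set String)
    (start : String) (fuel : Nat) (fr : List (List String)) (seen : PySem.Set String)
    (nxt : List (List String)) : Option (Bool × List String) :=
  match pvLevelB adj sccSet start fuel fr seen nxt with
  | Sum.inr r => r
  | Sum.inl (f', s', n') => pvOuterB adj sccSet start f' n' s'

def pvBestOf (best : Option (List String)) : Option (Bool × List String) → Option (List String)
  | none => best
  | some (_, c) => pvUpd best c

theorem pvOuterB_zero (adj : PySem.Dict String (List String)) (sccSet : PySem.Set String)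
    (start : String) (fr : List (List String)) (seen : PySem.Set String) :
    pvOuterB adj sccSet start 0 fr seen = none := by
  cases fr <;> simp [pvOuterB]

theorem pvOuterB_nil (adj : PySem.Dict String (List String)) (sccSet : PySem.Set String)
    (start : String) (fuel : Nat) (seen : PySem.Set String) :
    pvOuterB adj sccSet start fuel [] seen = none := by
  cases fuel <;> simp [pvOuterB]

theorem pvOuterMid_nil (adj : PySem.Dict String (List String)) (sccSet : PySem.Set String)
    (start : String) (fuel : Nat) (seen : PySem.Set String) (nxt : List (List String)) :
    pvOuterMid adj sccSet start fuel [] seen nxt = pvOuterB adj sccSet start fuel nxt seen := by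
  simp [pvOuterMid, pvLevelB]

theorem pvOuterB_eq_mid (adj : PySem.Dict String (List String)) (sccSet : PySem.Set String)
    (start : String) :
    ∀ (fuel : Nat) (fr : List (List String)) (seen : PySem.Set String),
      pvOuterB adj sccSet start fuel fr seen = pvOuterMid adj sccSet start fuel fr seen [] := by
  intro fuel fr seen
  cases fuel with
  | zero =>
    cases fr with
    | nil => simp [pvOuterB, pvOuterMid, pvLevelB]
    | cons p rest => simp [pvOuterB, pvOuterMid, pvLevelB]
  | succ fuel =>
    cases fr with
    | nil => rw [pvOuterB_nil, pvOuterMid_nil, pvOuterB_nil]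
    | cons p rest =>
      rw [pvOuterB, pvOuterMid]
      split <;> rename_i h <;> rw [h]

theorem pvOuterB_cons (adj : PySem.Dict String (List String)) (sccSet : PySem.Set String)
    (start : String) (fuel : Nat) (p : List String) (rest : List (List String))
    (seen : PySem.Set String) :
    pvOuterB adj sccSet start (fuel + 1) (p :: rest) seen
      = match pvLevelB adj sccSet start (fuel + 1) (p :: rest) seen [] with
        | Sum.inr r => r
        | Sum.inl (f', s', n') => pvOuterB adj sccSet start f' n' s' := by
  rw [pvOuterB]
  split <;> rename_i h <;> rw [h]

-- BFS simulation: A's node queue with predecessor map runs in lock-step with B's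
-- path-carrying frontier (one fuel unit per popped node / processed frontier entry)
theorem pvSim (adj : PySem.Dict String (List String)) (sccSet : PySem.Set String)
    (start : String) :
    ∀ (fuel : Nat) (pred : PySem.Dict String String) (seen : PySem.Set String)
      (qA : List String) (fr nxt : List (List String)) (best : Option (List String)),
      pvInvV pred seen → List.Forall₂ (pvEntryOK pred start) qA (fr ++ nxt) →
      pvBfsA adj sccSet start fuel pred qA best
        = pvBestOf best (pvOuterMid adj sccSet start fuel fr seen nxt) ∧
      ∀ c, pvOuterMid adj sccSet start fuel fr seen nxt ≠ some (true, c) := by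
  intro fuel
  induction fuel with
  | zero =>
    intro pred seen qA fr nxt best _ _
    cases fr with
    | nil =>
      rw [pvOuterMid_nil, pvOuterB_zero]
      exact ⟨rfl, by simp⟩
    | cons p rest =>
      constructor
      · show best = pvBestOf best (pvOuterMid adj sccSet start 0 (p :: rest) seen nxt)
        simp [pvOuterMid, pvLevelB, pvBestOf]
      · intro c; simp [pvOuterMid, pvLevelB]
  | succ fuel ih =>
    intro pred seen qA fr nxt best hV hQ
    have core : ∀ (p : List String) (ps nxt' : List (List String)),
        List.Forall₂ (pvEntryOK pred start) qA ((p :: ps) ++ nxt') →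
        pvBfsA adj sccSet start (fuel + 1) pred qA best
          = pvBestOf best (pvOuterMid adj sccSet start (fuel + 1) (p :: ps) seen nxt') ∧
        ∀ c, pvOuterMid adj sccSet start (fuel + 1) (p :: ps) seen nxt' ≠ some (true, c) := by
      intro p ps nxt' hQ'
      cases hQ' with
      | cons hpq htail =>
        rename_i n qA'
        obtain ⟨hpne, hlast⟩ := pvEntry_last hpq
        by_cases hstart : start ∈ pvNbrsB adj sccSet n
        · -- cycle found at this entry
          have hA := pvInnerA_found sccSet start (pvSortedNbrs adj n) pred qA' best n p
            (List.mem_of_mem_filter hstart)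
            (by have := (List.mem_filter.mp hstart).2; simpa using this) hpq
          have hlev : pvLevelB adj sccSet start (fuel + 1) (p :: ps) seen nxt'
              = Sum.inr (some (p.isEmpty, start :: p)) := by
            simp only [pvLevelB, hlast]
            rw [if_pos hstart]
          have hBmid : pvOuterMid adj sccSet start (fuel + 1) (p :: ps) seen nxt'
              = some (p.isEmpty, start :: p) := by
            simp only [pvOuterMid, hlev]
          have hAeq : pvBfsA adj sccSet start (fuel + 1) pred (n :: qA') best
              = pvUpd best (start :: p) := by
            simp only [pvBfsA, hlast]
            have h2 := congrArg Prod.snd hA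
            have h1 := congrArg Prod.fst hA
            simp only at h1 h2
            rw [h2]
            simp [h1]
          refine ⟨?_, ?_⟩
          · rw [hAeq, hBmid]; simp [pvBestOf]
          · intro c hc
            rw [hBmid] at hc
            have h1 : p.isEmpty = true := congrArg Prod.fst (Option.some.inj hc)
            exact hpne (List.isEmpty_iff.mp h1)
        · -- no cycle at this entry: extend and continue
          have hns : start ∉ (pvSortedNbrs adj n).filter (fun m => decide (m ∈ sccSet)) := hstart
          obtain ⟨hfound, hV', hQ''⟩ :=
            pvInner_ext sccSet start (pvSortedNbrs adj n) pred seen qA' ps nxt' best n p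
              hV hpq htail hns
          have hlev : pvLevelB adj sccSet start (fuel + 1) (p :: ps) seen nxt'
              = pvLevelB adj sccSet start fuel ps
                  (pvExtendB p (pvNbrsB adj sccSet n) seen nxt').1
                  (pvExtendB p (pvNbrsB adj sccSet n) seen nxt').2 := by
            simp only [pvLevelB, hlast]
            rw [if_neg hstart]
          have hmid : pvOuterMid adj sccSet start (fuel + 1) (p :: ps) seen nxt'
              = pvOuterMid adj sccSet start fuel ps
                  (pvExtendB p (pvNbrsB adj sccSet n) seen nxt').1
                  (pvExtendB p (pvNbrsB adj sccSet n) seen nxt').2 := by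
            simp only [pvOuterMid, hlev]
          have hAstep : pvBfsA adj sccSet start (fuel + 1) pred (n :: qA') best
              = pvBfsA adj sccSet start fuel
                  (pvInnerA sccSet start n (pvSortedNbrs adj n) pred qA' best).1
                  (pvInnerA sccSet start n (pvSortedNbrs adj n) pred qA' best).2.1 best := by
            simp only [pvBfsA]
            have h1 := congrArg Prod.fst hfound
            have h2 := congrArg Prod.snd hfound
            simp only at h1 h2
            rw [h2]
            simp [h1]
          obtain ⟨ihEq, ihFlag⟩ := ih
            (pvInnerA sccSet start n (pvSortedNbrs adj n) pred qA' best).1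
            (pvExtendB p (pvNbrsB adj sccSet n) seen nxt').1
            (pvInnerA sccSet start n (pvSortedNbrs adj n) pred qA' best).2.1
            ps (pvExtendB p (pvNbrsB adj sccSet n) seen nxt').2 best hV' hQ''
          rw [hAstep, hmid]
          exact ⟨ihEq, ihFlag⟩
    cases fr with
    | cons p ps => exact core p ps nxt hQ
    | nil =>
      rw [pvOuterMid_nil, pvOuterB_eq_mid]
      cases nxt with
      | nil =>
        cases hQ with
        | nil =>
          rw [pvOuterMid_nil, pvOuterB_nil]
          exact ⟨rfl, by simp⟩
      | cons p ps =>
        exact core p ps [] (by simpa using hQ)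

-- A's seeding loop returns the early '[start]' exactly when start is its own in-SCC neighbor
theorem pvInitA_none_iff (sccSet : PySem.Set String) (start : String) :
    ∀ (ns : List String) (pred : PySem.Dict String String) (qA : List String),
      pvInitA sccSet start ns pred qA = none
        ↔ start ∈ ns.filter (fun m => decide (m ∈ sccSet)) := by
  intro ns
  induction ns with
  | nil => intro pred qA; simp [pvInitA]
  | cons m rest ih =>
    intro pred qA
    by_cases hscc : m ∈ sccSet
    · by_cases hm : m = start
      · subst hm
        simp [pvInitA, if_pos hscc, List.filter_cons, hscc]
      · simp only [pvInitA, if_pos hscc, if_neg hm]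
        rw [ih]
        have hfil : (m :: rest).filter (fun x => decide (x ∈ sccSet))
            = m :: rest.filter (fun x => decide (x ∈ sccSet)) := by simp [hscc]
        rw [hfil, List.mem_cons]
        constructor
        · exact Or.inr
        · rintro (h | h)
          · exact absurd h.symm hm
          · exact h
    · simp only [pvInitA, if_neg hscc]
      rw [ih]
      simp [hscc]

-- A's seeding loop (no visited check: the neighbor list is sorted(set), hence Nodup)
-- matches B's level-0 pvExtendB expansion
theorem pvInit_ext (sccSet : PySem.Set String) (start : String) :
    ∀ (ns : List String) (pred : PySem.Dict String String) (seen : PySem.Set String)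
      (qA : List String) (nxt : List (List String)),
      pvInvV pred seen → List.Forall₂ (pvEntryOK pred start) qA nxt →
      (ns.filter (fun m => decide (m ∈ sccSet))).Nodup →
      (∀ m ∈ ns.filter (fun m => decide (m ∈ sccSet)), pred.contains m = false) →
      start ∉ ns.filter (fun m => decide (m ∈ sccSet)) →
      ∃ pr, pvInitA sccSet start ns pred qA = some pr ∧
        pvInvV pr.1 (pvExtendB [] (ns.filter (fun m => decide (m ∈ sccSet))) seen nxt).1 ∧
        List.Forall₂ (pvEntryOK pr.1 start) pr.2
          (pvExtendB [] (ns.filter (fun m => decide (m ∈ sccSet))) seen nxt).2 := by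
  intro ns
  induction ns with
  | nil =>
    intro pred seen qA nxt hV hQ _ _ _
    exact ⟨(pred, qA), rfl, hV, hQ⟩
  | cons m rest ih =>
    intro pred seen qA nxt hV hQ hnd hfresh hns
    by_cases hscc : m ∈ sccSet
    · have hfil : (m :: rest).filter (fun m => decide (m ∈ sccSet))
          = m :: rest.filter (fun m => decide (m ∈ sccSet)) := by
        simp [hscc]
      rw [hfil] at hnd hfresh hns ⊢
      have hm : m ≠ start := by rintro rfl; exact hns (List.mem_cons.mpr (Or.inl rfl))
      have hcont : pred.contains m = false := hfresh m List.mem_cons_self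
      have hget : pred.get? m = none := pvNotContains_get? hcont
      have hfreshIns : pred.get? m = none ∨ pred.get? m = some start := Or.inl hget
      have hmemSeen : m ∉ seen := fun hx => by
        have := (hV m).mpr hx; rw [hcont] at this; cases this
      simp only [pvInitA, pvExtendB, if_pos hscc, if_neg hm, if_neg hmemSeen]
      have hsize : (pred.insert m start).size = pred.size + 1 := by
        rw [PySem.Dict.size_insert, if_neg (by simp [hcont])]
      have hnewEntry : pvEntryOK (pred.insert m start) start m ([] ++ [m]) := by
        refine ⟨hm, ?_, by simp [hsize]⟩
        exact pvChain.base m (PySem.Dict.get?_insert_self _ _ _)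
      have hQ' : List.Forall₂ (pvEntryOK (pred.insert m start) start) (qA ++ [m])
          (nxt ++ [[] ++ [m]]) :=
        pvForall₂_append (pvForall₂_stable m start hfreshIns hQ)
          (List.forall₂_cons.mpr ⟨hnewEntry, List.Forall₂.nil⟩)
      have hfresh' : ∀ x ∈ rest.filter (fun m => decide (m ∈ sccSet)),
          (pred.insert m start).contains x = false := by
        intro x hx
        have hxm : x ≠ m := fun hxe => (List.nodup_cons.mp hnd).1 (hxe ▸ hx)
        rw [PySem.Dict.contains_insert]
        simp [hxm, hfresh x (List.mem_cons_of_mem _ hx)]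
      exact ih (pred.insert m start) (seen.add m) (qA ++ [m]) (nxt ++ [[] ++ [m]])
        (pvInvV_insert hV m start) hQ' (List.nodup_cons.mp hnd).2 hfresh'
        (fun hx => hns (List.mem_cons_of_mem _ hx))
    · have hfil : (m :: rest).filter (fun m => decide (m ∈ sccSet))
          = rest.filter (fun m => decide (m ∈ sccSet)) := by
        simp [hscc]
      rw [hfil] at hnd hfresh hns ⊢
      simp only [pvInitA, if_neg hscc]
      exact ih pred seen qA nxt hV hQ hnd hfresh hns

theorem pvSortedNbrs_nodup (adj : PySem.Dict String (List String)) (v : String) :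
    (pvSortedNbrs adj v).Nodup :=
  (PySem.List.sorted_ofList_pairwise_lt (adj.getD v [])).imp (fun h => ne_of_lt h)

theorem pvStarts_eq (adj : PySem.Dict String (List String)) (sccSet : PySem.Set String)
    (fuel : Nat) :
    ∀ (starts : List String) (best : Option (List String)),
      pvStartsA adj sccSet fuel starts best = pvStartsB adj sccSet (fuel + 1) starts best := by
  intro starts
  induction starts with
  | nil => intro best; rfl
  | cons start rest ih =>
    intro best
    have hV : pvInvV PySem.Dict.empty PySem.Set.empty := by
      intro k; simp [PySem.Dict.contains_empty, PySem.Set.empty]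
    have hcur0 : PySem.List.pyGetD ([] : List String) (-1) start = start := rfl
    by_cases hstart : start ∈ pvNbrsB adj sccSet start
    · -- self-loop: both return [start]
      have hA : pvInitA sccSet start (pvSortedNbrs adj start) PySem.Dict.empty [] = none :=
        (pvInitA_none_iff sccSet start _ _ _).mpr hstart
      have hB : pvOuterB adj sccSet start (fuel + 1) [[]] PySem.Set.empty
          = some (true, [start]) := by
        have hlev : pvLevelB adj sccSet start (fuel + 1) [[]] PySem.Set.empty []
            = Sum.inr (some (true, [start])) := by
          simp only [pvLevelB, hcur0]
          rw [if_pos hstart]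
          rfl
        rw [pvOuterB_cons, hlev]
      simp only [pvStartsA, pvStartsB, hA, hB]
    · have hns : start ∉ (pvSortedNbrs adj start).filter (fun m => decide (m ∈ sccSet)) :=
        hstart
      obtain ⟨pr, hA, hV', hQ'⟩ := pvInit_ext sccSet start (pvSortedNbrs adj start)
        PySem.Dict.empty PySem.Set.empty [] [] hV List.Forall₂.nil
        ((pvSortedNbrs_nodup adj start).filter _)
        (fun m _ => PySem.Dict.contains_empty m) hns
      have hB : pvOuterB adj sccSet start (fuel + 1) [[]] PySem.Set.empty
          = pvOuterMid adj sccSet start fuel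
              (pvExtendB [] (pvNbrsB adj sccSet start) PySem.Set.empty []).2
              (pvExtendB [] (pvNbrsB adj sccSet start) PySem.Set.empty []).1 [] := by
        have hlev : pvLevelB adj sccSet start (fuel + 1) [[]] PySem.Set.empty []
            = Sum.inl (fuel,
                (pvExtendB [] (pvNbrsB adj sccSet start) PySem.Set.empty []).1,
                (pvExtendB [] (pvNbrsB adj sccSet start) PySem.Set.empty []).2) := by
          simp only [pvLevelB, hcur0]
          rw [if_neg hstart]
        rw [pvOuterB_cons, hlev]
        exact pvOuterB_eq_mid adj sccSet start fuel _ _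
      obtain ⟨hSim, hFlag⟩ := pvSim adj sccSet start fuel pr.1
        (pvExtendB [] (pvNbrsB adj sccSet start) PySem.Set.empty []).1 pr.2
        (pvExtendB [] (pvNbrsB adj sccSet start) PySem.Set.empty []).2 [] best
        hV' (by simpa using hQ')
      simp only [pvStartsA, pvStartsB, hA, hB]
      cases hM : pvOuterMid adj sccSet start fuel
          (pvExtendB [] (pvNbrsB adj sccSet start) PySem.Set.empty []).2
          (pvExtendB [] (pvNbrsB adj sccSet start) PySem.Set.empty []).1 [] with
      | none =>
        rw [hSim, hM]
        simp only [pvBestOf]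
        exact ih best
      | some r =>
        obtain ⟨flag, c⟩ := r
        cases flag with
        | true => exact absurd hM (hFlag c)
        | false =>
          rw [hSim, hM]
          simp only [pvBestOf]
          exact ih (pvUpd best c)

-- ===== VERDICT (by name: the statement is the Claim_ definition above) =====
theorem shortest_cycle_in_scc_py_spec : Claim_equal_shortest_cycle_in_scc_py := by
  intro adjacency scc _
  show shortest_cycle_in_scc_py adjacency scc = shortest_cycle_in_scc_py_alt adjacency scc
  simp only [shortest_cycle_in_scc_py, shortest_cycle_in_scc_py_alt]
  rw [pvStarts_eq]
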